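-- pv_equiv track=rewrite | github.com/spacetelescope/learning | stsci/learning/corpus.py | rmcode
-- ===== SOURCE A (Python) =====
-- def rmcode(txt):
--     """Remove code blocks from markdown text"""
--     if '```' not in txt:
--         return txt
--     i = txt.find('```')
--     n = txt.find('```', i + 3)
--     if n == -1:
--         return txt.replace('```', '')
--     txt = txt.replace(txt[i:n + 3], '')
--     if '```' in txt:
--         return rmcode(txt)
--     return txt.strip()
-- ===== SOURCE B (Python) =====
-- def rmcode(txt):
--     """Remove code blocks from markdown text"""
--     if '```' not in txt:
--         return txt
--     while True:
--         pre, fence, rest = txt.partition('```')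
--         body, fence2, post = rest.partition('```')
--         if not fence2:
--             return txt.replace('```', '')
--         txt = txt.replace('```' + body + '```', '')
--         if '```' not in txt:
--             return txt.strip()
-- ===== Notes on version B (the rewrite author's own statement) =====
-- stated objective: alternative
-- what changed: A's tail recursion with find/index slicing is rewritten as an explicit while-loop that splits the text with str.partition instead of computing indices, keeping the replace-all and strip-only-on-final-branch semantics.
import Mathlib
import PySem

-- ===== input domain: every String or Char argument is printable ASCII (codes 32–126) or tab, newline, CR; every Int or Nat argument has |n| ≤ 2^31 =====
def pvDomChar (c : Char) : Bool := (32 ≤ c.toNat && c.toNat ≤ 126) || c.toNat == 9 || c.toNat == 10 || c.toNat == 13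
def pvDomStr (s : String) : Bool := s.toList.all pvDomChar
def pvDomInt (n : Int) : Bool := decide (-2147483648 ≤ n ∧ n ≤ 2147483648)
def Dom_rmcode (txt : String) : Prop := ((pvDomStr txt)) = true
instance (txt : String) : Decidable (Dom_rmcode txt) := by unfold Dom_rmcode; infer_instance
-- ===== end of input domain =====

-- B rewrites A's tail recursion as an explicit while-loop built on str.partition instead of
-- index arithmetic with find/slicing; same cost, different decomposition (objective: alternative).

def pvTicks : List Char := ['`', '`', '`']

-- ===== PORT A =====
-- A's tail recursion, on List Char; fuel = |txt| + 1 only makes the recursion structural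
-- (every recursive call is on a strictly shorter string), the algorithm is A's line for line.
def rmcodeGoA : Nat → List Char → List Char
  | 0, s => s
  | fuel + 1, s =>
    if PySem.Chars.isIn pvTicks s = false then s                      -- if '```' not in txt: return txt
    else
      let i := PySem.Chars.find s pvTicks                              -- i = txt.find('```')
      let n := PySem.Chars.findFrom s pvTicks (i + 3)                  -- n = txt.find('```', i + 3)
      if n = -1 then PySem.Chars.replace s pvTicks []                  -- return txt.replace('```', '')
      else
        let s' := PySem.Chars.replace s (PySem.List.slice s (some i) (some (n + 3))) []
        if PySem.Chars.isIn pvTicks s' then rmcodeGoA fuel s'          -- return rmcode(txt)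
        else PySem.Chars.strip s'                                      -- return txt.strip()

def rmcode (txt : String) : String :=
  String.ofList (rmcodeGoA (txt.toList.length + 1) txt.toList)

-- ===== PORT B =====
-- str.partition(sep), exact hand port: first occurrence splits the string in three.
def pvPartition (s sep : List Char) : List Char × List Char × List Char :=
  let i := PySem.Chars.find s sep
  if i = -1 then (s, [], [])
  else (s.take i.toNat, sep, s.drop (i.toNat + sep.length))

-- B's while-loop (entered only when '```' is in txt); same fuel discipline as A's port.
def rmcodeGoB : Nat → List Char → List Char
  | 0, s => s
  | fuel + 1, s =>
    let p := pvPartition s pvTicks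
    let q := pvPartition p.2.2 pvTicks                                 -- body, fence2, post
    if q.2.1 = [] then PySem.Chars.replace s pvTicks []                -- no closing fence
    else
      let s' := PySem.Chars.replace s (pvTicks ++ q.1 ++ pvTicks) []
      if PySem.Chars.isIn pvTicks s' = false then PySem.Chars.strip s'
      else rmcodeGoB fuel s'

def rmcode_alt (txt : String) : String :=
  if PySem.Chars.isIn pvTicks txt.toList = false then txt
  else String.ofList (rmcodeGoB (txt.toList.length + 1) txt.toList)

-- ===== PRECONDITION & SPEC =====
def Spec_rmcode (txt : String) (out : String) : Prop := out = rmcode_alt txt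
instance (txt : String) (out : String) : Decidable (Spec_rmcode txt out) := by unfold Spec_rmcode; infer_instance

-- ===== CLAIM (what is proved, stated in full; the proofs are below) =====
def Claim_equal_rmcode : Prop := ∀ (txt : String), Dom_rmcode txt → Spec_rmcode txt (rmcode txt)

-- ===== LEMMAS AND PROOFS =====


-- Core loop equivalence: on any string that contains '```', A's recursion and B's loop agree.
theorem rmcodeGo_eq (fuel : Nat) (s : List Char) (hin : PySem.Chars.isIn pvTicks s = true) :
    rmcodeGoA fuel s = rmcodeGoB fuel s := by
  induction fuel generalizing s with
  | zero => rfl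
  | succ fuel ih =>
    have hinf : PySem.Chars.isIn pvTicks s = true := hin
    -- the first fence
    have hi0 : 0 ≤ PySem.Chars.find s pvTicks := by
      rw [PySem.Chars.find_nonneg_iff]
      exact (PySem.Chars.isIn_iff_infix _ _).mp hin
    set i := PySem.Chars.find s pvTicks with hidef
    set k := i.toNat with hkdef
    have hik : i = (k : Int) := (Int.toNat_of_nonneg hi0).symm
    have hpre : pvTicks <+: s.drop k := (PySem.Chars.find_spec hi0).1
    have hk3 : k + 3 ≤ s.length := by
      have := hpre.length_le
      simp [pvTicks] at this
      omega
    have htake3 : List.take 3 (s.drop k) = pvTicks := by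
      have h := List.prefix_iff_eq_take.mp hpre
      simpa [pvTicks] using h.symm
    have hdropk : s.drop k = pvTicks ++ s.drop (k + 3) := by
      conv_lhs => rw [← List.take_append_drop 3 (s.drop k)]
      rw [htake3, List.drop_drop]
    set rest := s.drop (k + 3) with hrest
    have hfindFrom : PySem.Chars.findFrom s pvTicks (i + 3) =
        if PySem.Chars.find rest pvTicks = -1 then -1
        else ((k + 3 : Nat) : Int) + PySem.Chars.find rest pvTicks := by
      have := PySem.Chars.findFrom_natCast s pvTicks (k + 3) hk3
      rw [hik]
      push_cast at this ⊢
      exact this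
    -- B's two partitions
    have hp1 : pvPartition s pvTicks = (s.take k, pvTicks, rest) := by
      unfold pvPartition
      rw [← hidef]
      have hne : ¬ i = -1 := by omega
      rw [if_neg hne]
      simp [pvTicks, hrest, hik]
    by_cases hj : PySem.Chars.find rest pvTicks = -1
    · -- no closing fence: both return replace s '```' ''
      have hq : pvPartition rest pvTicks = (rest, [], []) := by
        unfold pvPartition; simp [hj]
      simp only [rmcodeGoA, rmcodeGoB, hinf, Bool.true_eq_false, if_false, hp1, hq,
        ← hidef, hfindFrom, hj, if_true]
    · -- a closing fence: the removed block is '```' ++ body ++ '```' on both sides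
      have hj0 : 0 ≤ PySem.Chars.find rest pvTicks := by
        have := PySem.Chars.neg_one_le_find rest pvTicks
        omega
      set j := PySem.Chars.find rest pvTicks with hjdef
      set jn := j.toNat with hjndef
      have hjk : j = (jn : Int) := (Int.toNat_of_nonneg hj0).symm
      have hpre2 : pvTicks <+: rest.drop jn := (PySem.Chars.find_spec hj0).1
      have hq : pvPartition rest pvTicks = (rest.take jn, pvTicks, rest.drop (jn + 3)) := by
        unfold pvPartition
        rw [← hjdef, if_neg hj]
        simp [pvTicks, hjk]
      have htake3' : List.take 3 (rest.drop jn) = pvTicks := by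
        have h := List.prefix_iff_eq_take.mp hpre2
        simpa [pvTicks] using h.symm
      have hslice : PySem.List.slice s (some i) (some (((k + 3 : Nat) : Int) + j + 3))
          = pvTicks ++ rest.take jn ++ pvTicks := by
        rw [hik, hjk]
        rw [show ((k + 3 : Nat) : Int) + (jn : Int) + 3 = ((k + 3 + jn + 3 : Nat) : Int) by push_cast; ring]
        rw [PySem.List.slice_toNat s (by positivity) (by positivity)]
        simp only [Int.toNat_natCast]
        rw [show k + 3 + jn + 3 - k = 3 + (jn + 3) by omega, List.take_add, hdropk]
        rw [List.take_left' (by simp [pvTicks]), List.drop_left' (by simp [pvTicks])]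
        rw [List.take_add, htake3', List.append_assoc]
      simp only [rmcodeGoA, rmcodeGoB, hinf, Bool.true_eq_false, if_false, ← hidef,
        hfindFrom, hj, hp1, hq]
      rw [if_neg (show ¬((k + 3 : Nat) : Int) + j = -1 by omega),
        if_neg (show pvTicks ≠ ([] : List Char) by simp [pvTicks]), hslice]
      set s' := PySem.Chars.replace s (pvTicks ++ rest.take jn ++ pvTicks) [] with hs'
      by_cases hs'in : PySem.Chars.isIn pvTicks s' = true
      · simp only [hs'in, if_true, Bool.true_eq_false, if_false]
        exact ih s' hs'in
      · simp only [Bool.not_eq_true] at hs'in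
        simp [hs'in]

-- ===== VERDICT (by name: the statement is the Claim_ definition above) =====
theorem rmcode_spec : Claim_equal_rmcode := by
  intro txt _
  unfold Spec_rmcode rmcode rmcode_alt
  by_cases h : PySem.Chars.isIn pvTicks txt.toList = true
  · simp only [h, Bool.true_eq_false, if_false]
    rw [rmcodeGo_eq _ _ h]
  · simp only [Bool.not_eq_true] at h
    simp only [h, if_true]
    rw [show rmcodeGoA (txt.toList.length + 1) txt.toList = txt.toList from by
      simp [rmcodeGoA, h]]
    simp
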